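-- pv_equiv track=rewrite | github.com/kanatakayasu/apriori-window | paper/E-topk-adaptive-window/implementation/python/topk_dense.py | compute_itemset_timestamps
-- ===== SOURCE A (Python) =====
-- from typing import Dict, List, Optional, Sequence, Set, Tuple
--
-- def intersect_sorted(a: Sequence[int], b: Sequence[int]) -> List[int]:
--     """Intersect two sorted integer lists."""
--     result: List[int] = []
--     i = j = 0
--     while i < len(a) and j < len(b):
--         if a[i] == b[j]:
--             result.append(a[i])
--             i += 1
--             j += 1
--         elif a[i] < b[j]:
--             i += 1
--         else:
--             j += 1
--     return result
--
-- def compute_itemset_timestamps(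
--     itemset: Tuple[int, ...],
--     item_timestamps: Dict[int, List[int]],
-- ) -> List[int]:
--     """Get co-occurrence timestamps for an itemset."""
--     if not itemset:
--         return []
--     lists = [item_timestamps.get(item, []) for item in itemset]
--     if any(not lst for lst in lists):
--         return []
--     result = list(lists[0])
--     for lst in lists[1:]:
--         result = intersect_sorted(result, lst)
--         if not result:
--             break
--     return result
-- ===== SOURCE B (Python) =====
-- def compute_itemset_timestamps(itemset, item_timestamps):
--     """Get co-occurrence timestamps for an itemset.
--
--     Single simultaneous pass: filter the first item's list once, keeping one
--     persistent monotone cursor per remaining list (advance it past smaller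
--     values, keep x only if every cursor sits on x), instead of folding
--     pairwise two-pointer intersections through intermediate lists.
--     """
--     if not itemset:
--         return []
--     first = item_timestamps.get(itemset[0], [])
--     tails = [item_timestamps.get(item, []) for item in itemset[1:]]
--     cursors = [0] * len(tails)
--     out = []
--     for x in first:
--         keep = True
--         for idx, t in enumerate(tails):
--             j = cursors[idx]
--             n = len(t)
--             while j < n and t[j] < x:
--                 j += 1
--             if j < n and t[j] == x:
--                 cursors[idx] = j + 1
--             else:
--                 cursors[idx] = j
--                 keep = False
--                 break
--         if keep:
--             out.append(x)
--     return out
-- ===== Notes on version B (the rewrite author's own statement) =====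
-- stated objective: alternative
-- what changed: B replaces A's left fold of pairwise two-pointer intersections (materialising an intermediate result list per item) by a single simultaneous pass over the first item's list that keeps one persistent monotone cursor per remaining list and keeps an element only if every cursor lands on it, with per-element early exit.
import Mathlib
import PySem

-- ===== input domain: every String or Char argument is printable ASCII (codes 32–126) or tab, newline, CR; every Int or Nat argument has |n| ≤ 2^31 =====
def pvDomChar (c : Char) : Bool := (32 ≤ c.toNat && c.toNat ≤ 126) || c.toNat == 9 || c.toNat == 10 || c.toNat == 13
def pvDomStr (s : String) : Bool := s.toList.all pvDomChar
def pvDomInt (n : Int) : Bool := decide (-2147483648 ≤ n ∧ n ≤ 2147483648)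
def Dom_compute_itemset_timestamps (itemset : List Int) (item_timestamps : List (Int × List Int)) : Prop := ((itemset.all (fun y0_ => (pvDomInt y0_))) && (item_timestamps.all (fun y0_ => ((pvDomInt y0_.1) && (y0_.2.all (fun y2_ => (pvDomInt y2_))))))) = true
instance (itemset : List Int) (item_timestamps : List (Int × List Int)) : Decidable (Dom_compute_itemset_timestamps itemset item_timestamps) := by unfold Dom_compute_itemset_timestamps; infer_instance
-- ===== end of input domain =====

-- B replaces A's fold of pairwise two-pointer intersections by ONE simultaneous pass over the
-- first item's list with a persistent monotone cursor per remaining list (objective: alternative).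

-- ===== PORT A =====
-- intersect_sorted: the while loop over indices i, j with its result accumulator
-- (fuel = a.length + b.length bounds the iteration count; each step advances i or j)
def interAgo (fuel : Nat) (a b : List Int) (i j : Nat) (result : List Int) : List Int :=
  match fuel with
  | 0 => result
  | fuel + 1 =>
    if h : i < a.length ∧ j < b.length then
      if a[i] = b[j] then interAgo fuel a b (i + 1) (j + 1) (result ++ [a[i]])
      else if a[i] < b[j] then interAgo fuel a b (i + 1) j result
      else interAgo fuel a b i (j + 1) result
    else result

def intersect_sorted (a b : List Int) : List Int := interAgo (a.length + b.length) a b 0 0 []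

-- "for lst in lists[1:]: result = intersect_sorted(result, lst); if not result: break"
def aLoop (result : List Int) (lists : List (List Int)) : List Int :=
  match lists with
  | [] => result
  | lst :: rest =>
    let r := intersect_sorted result lst
    if r = [] then r else aLoop r rest

def compute_itemset_timestamps (itemset : List Int) (item_timestamps : List (Int × List Int)) : List Int :=
  if itemset = [] then []
  else
    let lists := itemset.map (fun item => (PySem.Dict.mk item_timestamps).getD item [])
    if lists.any (fun lst => decide (lst = [])) then []
    else aLoop (lists.headD []) lists.tail

-- ===== PORT B =====
-- "while j < n and t[j] < x: j += 1" (terminates: t.length - j decreases)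
def skipIdx (t : List Int) (x : Int) (j : Nat) : Nat :=
  if h : j < t.length then
    if t[j] < x then skipIdx t x (j + 1) else j
  else j
termination_by t.length - j

-- inner "for idx, t in enumerate(tails)" with break: the lists zipped with their cursors;
-- returns (keep, updated cursor states); on break the remaining cursors are untouched
def stepB (x : Int) : List (List Int × Nat) → Bool × List (List Int × Nat)
  | [] => (true, [])
  | (t, j) :: rest =>
    let j' := skipIdx t x j
    if h : j' < t.length then
      if t[j'] = x then
        let r := stepB x rest
        (r.1, (t, j' + 1) :: r.2)
      else (false, (t, j') :: rest)
    else (false, (t, j') :: rest)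

-- outer "for x in first" with the out accumulator
def passB : List Int → List (List Int × Nat) → List Int → List Int
  | [], _, out => out
  | x :: a, cs, out =>
    let r := stepB x cs
    passB a r.2 (if r.1 then out ++ [x] else out)

def compute_itemset_timestamps_alt (itemset : List Int) (item_timestamps : List (Int × List Int)) : List Int :=
  match itemset with
  | [] => []
  | first :: rest =>
    passB ((PySem.Dict.mk item_timestamps).getD first [])
      (rest.map (fun item => ((PySem.Dict.mk item_timestamps).getD item [], 0))) []

-- ===== PRECONDITION & SPEC =====
def Spec_compute_itemset_timestamps (itemset : List Int) (item_timestamps : List (Int × List Int)) (out : List Int) : Prop := out = compute_itemset_timestamps_alt itemset item_timestamps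
instance (itemset : List Int) (item_timestamps : List (Int × List Int)) (out : List Int) : Decidable (Spec_compute_itemset_timestamps itemset item_timestamps out) := by unfold Spec_compute_itemset_timestamps; infer_instance

-- ===== CLAIM (what is proved, stated in full; the proofs are below) =====
def Claim_equal_compute_itemset_timestamps : Prop := ∀ (itemset : List Int) (item_timestamps : List (Int × List Int)), Dom_compute_itemset_timestamps itemset item_timestamps → Spec_compute_itemset_timestamps itemset item_timestamps (compute_itemset_timestamps itemset item_timestamps)

-- ===== LEMMAS AND PROOFS =====

-- A's two-pointer merge, in structural form (proof vehicle only)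
def bMerge : List Int → List Int → List Int
  | x :: a, y :: b =>
    if x < y then bMerge a (y :: b)
    else if y < x then bMerge (x :: a) b
    else x :: bMerge a b
  | _, _ => []

lemma bMerge_nil_right (r : List Int) : bMerge r [] = [] := by cases r <;> simp [bMerge]

lemma bMerge_nil_left (l : List Int) : bMerge [] l = [] := by cases l <;> simp [bMerge]

lemma bMerge_cons_cons (x y : Int) (a b : List Int) :
    bMerge (x :: a) (y :: b) =
      if x < y then bMerge a (y :: b)
      else if y < x then bMerge (x :: a) b
      else x :: bMerge a b := by
  simp [bMerge]

-- A's index loop is the structural merge on the remaining suffixes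
lemma interAgo_eq (fuel : Nat) (a b : List Int) (i j : Nat) (acc : List Int)
    (hf : (a.length - i) + (b.length - j) ≤ fuel) :
    interAgo fuel a b i j acc = acc ++ bMerge (a.drop i) (b.drop j) := by
  induction fuel generalizing i j acc with
  | zero =>
    have hi : a.length ≤ i := by omega
    rw [interAgo, List.drop_eq_nil_of_le hi, bMerge_nil_left, List.append_nil]
  | succ fuel ih =>
    rw [interAgo]
    split
    · rename_i h
      rw [List.drop_eq_getElem_cons h.1, List.drop_eq_getElem_cons h.2, bMerge_cons_cons]
      by_cases heq : a[i] = b[j]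
      · rw [if_pos heq, if_neg (by omega), if_neg (by omega), ih (i + 1) (j + 1) _ (by omega)]
        simp
      · rw [if_neg heq]
        by_cases hlt : a[i] < b[j]
        · rw [if_pos hlt, if_pos hlt, ih (i + 1) j _ (by omega), List.drop_eq_getElem_cons h.2]
        · have hgt : b[j] < a[i] := by omega
          rw [if_neg hlt, if_neg hlt, if_pos hgt, ih i (j + 1) _ (by omega), List.drop_eq_getElem_cons h.1]
    · rename_i h
      rcases Nat.lt_or_ge i a.length with hi | hi
      · have hj : b.length ≤ j := by omega
        rw [List.drop_eq_nil_of_le hj, bMerge_nil_right, List.append_nil]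
      · rw [List.drop_eq_nil_of_le hi, bMerge_nil_left, List.append_nil]

lemma intersect_sorted_eq_bMerge (a b : List Int) : intersect_sorted a b = bMerge a b := by
  simpa using interAgo_eq (a.length + b.length) a b 0 0 [] (by omega)

-- the fold of merges without A's early break
def foldMerge (r : List Int) : List (List Int) → List Int
  | [] => r
  | t :: ts => foldMerge (bMerge r t) ts

lemma foldMerge_nil (ts : List (List Int)) : foldMerge [] ts = [] := by
  induction ts with
  | nil => rfl
  | cons t ts ih => simpa [foldMerge, bMerge_nil_left] using ih

lemma aLoop_eq_foldMerge (r : List Int) (ts : List (List Int)) :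
    aLoop r ts = foldMerge r ts := by
  induction ts generalizing r with
  | nil => rfl
  | cons t ts ih =>
    simp only [aLoop, foldMerge, intersect_sorted_eq_bMerge]
    by_cases h : bMerge r t = []
    · rw [if_pos h, h, foldMerge_nil]
    · rw [if_neg h, ih]

lemma foldMerge_mem_nil (r : List Int) (ts : List (List Int)) (h : [] ∈ ts) :
    foldMerge r ts = [] := by
  induction ts generalizing r with
  | nil => cases h
  | cons t ts ih =>
    rcases List.mem_cons.mp h with rfl | h'
    · simp [foldMerge, bMerge_nil_right, foldMerge_nil]
    · exact ih _ h'

-- B's pass, in suffix form (cursor index j replaced by the suffix t.drop j)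
def stepS (x : Int) : List (List Int) → Bool × List (List Int)
  | [] => (true, [])
  | t :: ts =>
    let t' := t.dropWhile (fun y => decide (y < x))
    if t'.head? = some x then ((stepS x ts).1, t'.tail :: (stepS x ts).2)
    else (false, t' :: ts)

def passS : List Int → List (List Int) → List Int
  | [], _ => []
  | x :: a, ts =>
    let r := stepS x ts
    if r.1 then x :: passS a r.2 else passS a r.2

-- filtering one list through one cursor, suffix form
def filt1 : List Int → List Int → List Int
  | [], _ => []
  | x :: a, t =>
    match t.dropWhile (fun y => decide (y < x)) with
    | [] => filt1 a []
    | y :: t'' => if y = x then x :: filt1 a t'' else filt1 a (y :: t'')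

lemma filt1_cons (x : Int) (a t : List Int) :
    filt1 (x :: a) t =
      match t.dropWhile (fun y => decide (y < x)) with
      | [] => filt1 a []
      | y :: t'' => if y = x then x :: filt1 a t'' else filt1 a (y :: t'') := rfl

lemma filt1_nil (a : List Int) : filt1 a [] = [] := by
  induction a with
  | nil => rfl
  | cons x a ih => simpa [filt1, List.dropWhile] using ih

lemma filt1_cons_lt {x y : Int} (a t : List Int) (hyx : y < x) :
    filt1 (x :: a) (y :: t) = filt1 (x :: a) t := by
  rw [filt1_cons, filt1_cons, List.dropWhile_cons]
  simp [hyx]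

-- the one-cursor filter computes A's two-pointer merge (on arbitrary lists)
lemma filt1_eq_bMerge_aux (n : Nat) : ∀ a t : List Int,
    a.length + t.length ≤ n → filt1 a t = bMerge a t := by
  induction n with
  | zero =>
    intro a t h
    cases a with
    | nil => rw [bMerge_nil_left]; rfl
    | cons x a => simp at h
  | succ n ih =>
    intro a t h
    cases a with
    | nil => rw [bMerge_nil_left]; rfl
    | cons x a =>
      cases t with
      | nil => rw [filt1_nil, bMerge_nil_right]
      | cons y t =>
        rw [bMerge_cons_cons]
        by_cases hyx : y < x
        · rw [filt1_cons_lt a t hyx, if_neg (by omega), if_pos hyx]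
          exact ih (x :: a) t (by simp at h ⊢; omega)
        · have hdw : (y :: t).dropWhile (fun z => decide (z < x)) = y :: t := by
            simp [List.dropWhile, hyx]
          rw [filt1_cons]
          simp only [hdw]
          by_cases hxy : x < y
          · rw [if_neg (by omega : ¬ (y = x)), if_pos hxy]
            exact ih a (y :: t) (by simp at h ⊢; omega)
          · have heq : y = x := by omega
            rw [if_pos heq, if_neg hxy, if_neg (by omega : ¬ (y < x))]
            rw [ih a t (by simp at h ⊢; omega)]

lemma filt1_eq_bMerge (a t : List Int) : filt1 a t = bMerge a t :=
  filt1_eq_bMerge_aux (a.length + t.length) a t le_rfl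

lemma passS_nil_cursors (a : List Int) : passS a [] = a := by
  induction a with
  | nil => rfl
  | cons x a ih => simpa [passS, stepS] using ih

-- threading one cursor through the pass = filtering through it first
lemma passS_cons (a t : List Int) (ts : List (List Int)) :
    passS a (t :: ts) = passS (filt1 a t) ts := by
  induction a generalizing t ts with
  | nil => rfl
  | cons x a ih =>
    cases hdw : t.dropWhile (fun y => decide (y < x)) with
    | nil =>
      have h1 : stepS x (t :: ts) = (false, [] :: ts) := by simp [stepS, hdw]
      simp only [passS, h1, Bool.false_eq_true, if_false, filt1_cons, hdw]
      exact ih [] ts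
    | cons y t'' =>
      by_cases hy : y = x
      · have h1 : stepS x (t :: ts) = ((stepS x ts).1, t'' :: (stepS x ts).2) := by
          simp [stepS, hdw, hy]
        simp only [passS, h1, filt1_cons, hdw, if_pos hy]
        rw [ih t'' (stepS x ts).2]
      · have h1 : stepS x (t :: ts) = (false, (y :: t'') :: ts) := by simp [stepS, hdw, hy]
        simp only [passS, h1, Bool.false_eq_true, if_false, filt1_cons, hdw, if_neg hy]
        exact ih (y :: t'') ts

lemma passS_eq_foldMerge (a : List Int) (ts : List (List Int)) :
    passS a ts = foldMerge a ts := by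
  induction ts generalizing a with
  | nil => exact passS_nil_cursors a
  | cons t ts ih => rw [passS_cons, filt1_eq_bMerge, foldMerge]; exact ih _

-- bridge: the index cursor j in the port denotes the suffix t.drop j
lemma skipIdx_drop (t : List Int) (x : Int) (j : Nat) :
    t.drop (skipIdx t x j) = (t.drop j).dropWhile (fun y => decide (y < x)) := by
  rw [skipIdx]
  split
  · rename_i h
    split
    · rename_i hlt
      rw [skipIdx_drop t x (j + 1), List.drop_eq_getElem_cons h, List.dropWhile_cons]
      simp [hlt]
    · rename_i hge
      rw [List.drop_eq_getElem_cons h, List.dropWhile_cons]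
      simp [hge]
  · rename_i h
    rw [List.drop_eq_nil_of_le (by omega)]
    simp
termination_by t.length - j

lemma stepB_eq_stepS (x : Int) (cs : List (List Int × Nat)) :
    (stepB x cs).1 = (stepS x (cs.map (fun p => p.1.drop p.2))).1 ∧
    (stepB x cs).2.map (fun p => p.1.drop p.2) = (stepS x (cs.map (fun p => p.1.drop p.2))).2 := by
  induction cs with
  | nil => exact ⟨rfl, rfl⟩
  | cons p rest ih =>
    obtain ⟨t, j⟩ := p
    have hd0 : (t.drop j).dropWhile (fun y => decide (y < x)) = t.drop (skipIdx t x j) :=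
      (skipIdx_drop t x j).symm
    rw [List.map_cons]
    by_cases h : skipIdx t x j < t.length
    · have hcons : (t.drop j).dropWhile (fun y => decide (y < x)) =
          t[skipIdx t x j] :: t.drop (skipIdx t x j + 1) :=
        hd0.trans (List.drop_eq_getElem_cons h)
      by_cases he : t[skipIdx t x j] = x
      · have hB : stepB x ((t, j) :: rest) =
            ((stepB x rest).1, (t, skipIdx t x j + 1) :: (stepB x rest).2) := by
          simp [stepB, h, he]
        have hS : stepS x (t.drop j :: rest.map (fun p => p.1.drop p.2)) =
            ((stepS x (rest.map (fun p => p.1.drop p.2))).1,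
              t.drop (skipIdx t x j + 1) :: (stepS x (rest.map (fun p => p.1.drop p.2))).2) := by
          simp [stepS, hcons, he]
        rw [hB, hS]
        exact ⟨ih.1, by simp [ih.2]⟩
      · have hB : stepB x ((t, j) :: rest) = (false, (t, skipIdx t x j) :: rest) := by
          simp [stepB, h, he]
        have hS : stepS x (t.drop j :: rest.map (fun p => p.1.drop p.2)) =
            (false, t.drop (skipIdx t x j) :: rest.map (fun p => p.1.drop p.2)) := by
          simp only [stepS, hcons, List.head?_cons, List.tail_cons]
          rw [if_neg (by simp [he]), ← List.drop_eq_getElem_cons h]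
        rw [hB, hS]
        exact ⟨rfl, by simp⟩
    · have hnil : (t.drop j).dropWhile (fun y => decide (y < x)) = [] :=
        hd0.trans (List.drop_eq_nil_of_le (by omega))
      have hB : stepB x ((t, j) :: rest) = (false, (t, skipIdx t x j) :: rest) := by
        simp [stepB, h]
      have hS : stepS x (t.drop j :: rest.map (fun p => p.1.drop p.2)) =
          (false, [] :: rest.map (fun p => p.1.drop p.2)) := by
        simp [stepS, hnil]
      rw [hB, hS]
      exact ⟨rfl, by simp [List.drop_eq_nil_of_le (show t.length ≤ skipIdx t x j by omega)]⟩

lemma passB_eq_passS (a : List Int) (cs : List (List Int × Nat)) (out : List Int) :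
    passB a cs out = out ++ passS a (cs.map (fun p => p.1.drop p.2)) := by
  induction a generalizing cs out with
  | nil => simp [passB, passS]
  | cons x a ih =>
    obtain ⟨h1, h2⟩ := stepB_eq_stepS x cs
    simp only [passB, passS, ih, h2, h1]
    cases (stepS x (cs.map (fun p => p.1.drop p.2))).1 <;> simp

-- ===== VERDICT (by name: the statement is the Claim_ definition above) =====
theorem compute_itemset_timestamps_spec : Claim_equal_compute_itemset_timestamps := by
  intro itemset ts _dom
  unfold Spec_compute_itemset_timestamps
  cases itemset with
  | nil => rfl
  | cons first rest =>
    have hB : compute_itemset_timestamps_alt (first :: rest) ts =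
        foldMerge ((PySem.Dict.mk ts).getD first [])
          (rest.map (fun item => (PySem.Dict.mk ts).getD item [])) := by
      simp only [compute_itemset_timestamps_alt, passB_eq_passS, List.nil_append,
        List.map_map, Function.comp_def, List.drop_zero]
      rw [passS_eq_foldMerge]
    simp only [compute_itemset_timestamps, reduceCtorEq, if_false, List.map_cons,
      List.headD_cons, List.tail_cons, hB]
    by_cases hany : (((PySem.Dict.mk ts).getD first []) ::
        rest.map (fun item => (PySem.Dict.mk ts).getD item [])).any
        (fun lst => decide (lst = [])) = true
    · rw [if_pos hany]
      rcases (by simpa using hany :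
          (PySem.Dict.mk ts).getD first [] = [] ∨
            ∃ x ∈ rest, (PySem.Dict.mk ts).getD x [] = []) with he | ⟨item, hm, he⟩
      · rw [he, foldMerge_nil]
      · exact (foldMerge_mem_nil _ _ (by
          refine List.mem_map.mpr ⟨item, hm, he⟩)).symm
    · rw [if_neg hany, aLoop_eq_foldMerge]
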